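-- pv_equiv track=rewrite | github.com/AlexSR2590/logica_python | 3-Ejercicios-logica/ejercicio12.py | serieEnCinco
-- ===== SOURCE A (Python) =====
-- def serieEnCinco(rango):
--     lista_numeros= []
--     contador = 0
--     valor = 0
--     while valor < rango:
--         valor = contador * 5
--         lista_numeros.append(str(f"n°{valor}"))
--         contador += 1
--     return lista_numeros
-- ===== SOURCE B (Python) =====
-- def serieEnCinco(rango):
--     if rango <= 0:
--         return []
--     K = -(-rango // 5)  # ceil(rango/5): index of smallest multiple of 5 that is >= rango
--     return [f"n°{5 * k}" for k in range(K + 1)]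
-- ===== Notes on version B (the rewrite author's own statement) =====
-- stated objective: simpler
-- what changed: Replaced the condition-driven while loop that discovers the stop point by recomputing valor each pass with a closed-form count K = ceil(rango/5) and a single comprehension over range(K+1).
import Mathlib
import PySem

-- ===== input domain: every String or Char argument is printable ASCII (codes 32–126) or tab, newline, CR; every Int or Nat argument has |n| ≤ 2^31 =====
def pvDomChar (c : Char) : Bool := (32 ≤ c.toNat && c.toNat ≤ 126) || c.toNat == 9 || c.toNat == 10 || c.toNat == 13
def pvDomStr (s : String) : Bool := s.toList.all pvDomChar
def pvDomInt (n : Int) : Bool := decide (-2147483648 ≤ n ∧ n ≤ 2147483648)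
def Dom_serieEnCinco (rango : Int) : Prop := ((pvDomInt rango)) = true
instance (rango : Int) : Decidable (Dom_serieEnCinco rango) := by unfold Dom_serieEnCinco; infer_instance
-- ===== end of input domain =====

-- B replaces A's condition-driven while loop with a closed-form count K = ceil(rango/5)
-- and one comprehension over range(K+1); objective: simpler.

-- ===== PORT A =====
-- while loop ported with a fuel parameter; fuel = rango.toNat + 2 bounds the iteration
-- count (contador grows by 1 each pass and the loop stops once (contador-1)*5 ≥ rango),
-- so the fuel guard never fires on any input: same computation, made total.
def serieEnCincoLoop (rango : Int) : Nat → Int → Int → List String → List String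
  | 0, _, _, acc => acc
  | fuel + 1, contador, valor, acc =>
    if valor < rango then
      let valor' := contador * 5
      serieEnCincoLoop rango fuel (contador + 1) valor'
        (acc ++ ["n°" ++ PySem.Int.toStr valor'])
    else acc

def serieEnCinco (rango : Int) : List String :=
  serieEnCincoLoop rango (rango.toNat + 2) 0 0 []

-- ===== PORT B =====
def serieEnCinco_alt (rango : Int) : List String :=
  if rango ≤ 0 then []
  else
    let K := -(PySem.Int.floordiv (-rango) 5)
    (PySem.List.pyRange 0 (K + 1) 1).map (fun k => "n°" ++ PySem.Int.toStr (5 * k))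

-- ===== PRECONDITION & SPEC =====
def Spec_serieEnCinco (rango : Int) (out : List String) : Prop := out = serieEnCinco_alt rango
instance (rango : Int) (out : List String) : Decidable (Spec_serieEnCinco rango out) := by unfold Spec_serieEnCinco; infer_instance

-- ===== CLAIM (what is proved, stated in full; the proofs are below) =====
def Claim_equal_serieEnCinco : Prop := ∀ (rango : Int), Dom_serieEnCinco rango → Spec_serieEnCinco rango (serieEnCinco rango)

-- ===== LEMMAS AND PROOFS =====

-- From state (contador = c, valor = (c-1)*5), with K = ceil(rango/5), the loop appends
-- exactly the strings for k = c .. K.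
lemma serieEnCincoLoop_eq (rango K : Int) (hK1 : (K - 1) * 5 < rango) (hK2 : rango ≤ K * 5) :
    ∀ (fuel : Nat) (c : Int) (acc : List String), 1 ≤ c → (K + 1 - c).toNat ≤ fuel →
      serieEnCincoLoop rango fuel c ((c - 1) * 5) acc =
        acc ++ (PySem.List.pyRange c (K + 1) 1).map (fun k => "n°" ++ PySem.Int.toStr (5 * k)) := by
  intro fuel
  induction fuel with
  | zero =>
    intro c acc hc hfuel
    have hc' : K + 1 ≤ c := by omega
    rw [PySem.List.pyRange_one_eq_nil hc']
    simp [serieEnCincoLoop]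
  | succ fuel ih =>
    intro c acc hc hfuel
    by_cases h : (c - 1) * 5 < rango
    · have hcK : c ≤ K := by nlinarith
      rw [serieEnCincoLoop]
      simp only [h, if_true]
      have hv : c * 5 = ((c + 1) - 1) * 5 := by ring
      rw [hv, ih (c + 1) _ (by omega) (by omega)]
      rw [PySem.List.pyRange_one_cons (by omega : c < K + 1)]
      simp only [List.map_cons, List.append_assoc, List.singleton_append]
      rw [mul_comm 5 c, show (c + 1 - 1) * 5 = c * 5 from by ring]
    · have hcK : K + 1 ≤ c := by nlinarith
      rw [serieEnCincoLoop]
      simp only [h, if_false]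
      rw [PySem.List.pyRange_one_eq_nil hcK]
      simp

-- ===== VERDICT (by name: the statement is the Claim_ definition above) =====
theorem serieEnCinco_spec : Claim_equal_serieEnCinco := by
  intro rango _
  unfold Spec_serieEnCinco serieEnCinco serieEnCinco_alt
  by_cases hr : rango ≤ 0
  · simp only [hr, if_true]
    rw [serieEnCincoLoop]
    simp [show ¬ ((0:Int) < rango) by omega]
  · simp only [hr, if_false]
    replace hr : 0 < rango := by omega
    set K := -(PySem.Int.floordiv (-rango) 5) with hKdef
    have hceil := (PySem.Int.neg_floordiv_neg_eq_iff_of_pos (a := rango) (b := 5) (q := K)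
      (by omega)).mp rfl
    obtain ⟨hK1, hK2⟩ := hceil
    have hKpos : 1 ≤ K := by nlinarith
    rw [show rango.toNat + 2 = (rango.toNat + 1) + 1 from rfl, serieEnCincoLoop]
    simp only [show (0:Int) < rango from hr, if_true]
    rw [show (0:Int) + 1 = 1 from rfl, show (0:Int) * 5 = ((1:Int) - 1) * 5 from by ring,
      serieEnCincoLoop_eq rango K hK1 hK2 (rango.toNat + 1) 1
        ([] ++ ["n°" ++ PySem.Int.toStr (((1:Int) - 1) * 5)]) (by omega) (by omega)]
    rw [PySem.List.pyRange_one_cons (by omega : (0:Int) < K + 1)]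
    simp
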